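-- pv_equiv track=rewrite | github.com/rohankhatri7/AURA | backend/mode.py | allowed_modes
-- ===== SOURCE A (Python) =====
-- from typing import List, Optional
--
-- MODES = [
--     "reflection",
--     "reframe",
--     "options",
--     "values",
--     "micro_plan",
--     "summary",
--     "compassion",
--     "curious",
-- ]
--
-- def allowed_modes(intent: str, emotion: str) -> List[str]:
--     allowed = set()
--
--     if emotion in {"sadness", "fear"}:
--         allowed.update({"compassion", "reflection", "micro_plan", "values"})
--     if emotion == "anger":
--         allowed.update({"reflection", "reframe", "options"})
--     if emotion == "joy":
--         allowed.update({"summary", "values", "micro_plan"})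
--
--     if intent == "goal_setting":
--         allowed.update({"micro_plan", "options", "values"})
--
--     allowed.add("reflection")
--     return [mode for mode in MODES if mode in allowed]
-- ===== SOURCE B (Python) =====
-- def allowed_modes(intent, emotion):
--     # Build the result directly in canonical MODES order from per-mode
--     # inclusion conditions; no intermediate set, no filter pass.
--     sad = emotion in ("sadness", "fear")
--     ang = emotion == "anger"
--     joy = emotion == "joy"
--     goal = intent == "goal_setting"
--
--     out = ["reflection"]          # always allowed
--     if ang:
--         out.append("reframe")
--     if ang or goal:
--         out.append("options")
--     if sad or joy or goal:
--         out.append("values")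
--     if sad or joy or goal:
--         out.append("micro_plan")
--     if joy:
--         out.append("summary")
--     if sad:
--         out.append("compassion")
--     # "curious" is never allowed
--     return out
-- ===== Notes on version B (the rewrite author's own statement) =====
-- stated objective: simpler
-- what changed: Instead of accumulating an 'allowed' set through if-branches and then filtering MODES against it, B derives a per-mode inclusion condition for each mode and appends the modes directly in canonical order, with no set and no filter pass.
import Mathlib
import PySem

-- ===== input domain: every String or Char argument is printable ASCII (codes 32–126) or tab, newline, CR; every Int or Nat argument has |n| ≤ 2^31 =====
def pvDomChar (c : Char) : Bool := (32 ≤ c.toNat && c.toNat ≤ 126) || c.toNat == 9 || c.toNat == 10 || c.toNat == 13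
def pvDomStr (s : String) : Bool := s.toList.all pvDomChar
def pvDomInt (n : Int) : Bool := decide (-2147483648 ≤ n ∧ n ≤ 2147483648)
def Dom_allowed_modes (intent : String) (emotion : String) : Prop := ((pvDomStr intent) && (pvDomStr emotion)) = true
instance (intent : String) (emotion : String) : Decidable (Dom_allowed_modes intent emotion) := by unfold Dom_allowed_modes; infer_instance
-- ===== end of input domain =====

-- ===== PORT A =====
-- Header: B builds the result list directly in MODES order from per-mode
-- inclusion conditions (simpler: no set accumulation, no filter pass).
def pvMODES : List String :=
  ["reflection", "reframe", "options", "values", "micro_plan", "summary", "compassion", "curious"]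

def allowed_modes (intent : String) (emotion : String) : List String :=
  let allowed : PySem.Set String := PySem.Set.empty
  let allowed := if emotion = "sadness" ∨ emotion = "fear" then
      PySem.Set.update allowed ["compassion", "reflection", "micro_plan", "values"]
    else allowed
  let allowed := if emotion = "anger" then
      PySem.Set.update allowed ["reflection", "reframe", "options"]
    else allowed
  let allowed := if emotion = "joy" then
      PySem.Set.update allowed ["summary", "values", "micro_plan"]
    else allowed
  let allowed := if intent = "goal_setting" then
      PySem.Set.update allowed ["micro_plan", "options", "values"]
    else allowed
  let allowed := PySem.Set.add allowed "reflection"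
  pvMODES.filter (fun mode => PySem.Set.contains allowed mode)

-- ===== PORT B =====
def allowed_modes_alt (intent : String) (emotion : String) : List String :=
  let sad := emotion == "sadness" || emotion == "fear"
  let ang := emotion == "anger"
  let joy := emotion == "joy"
  let goal := intent == "goal_setting"
  ["reflection"]
    ++ (if ang then ["reframe"] else [])
    ++ (if ang || goal then ["options"] else [])
    ++ (if sad || joy || goal then ["values"] else [])
    ++ (if sad || joy || goal then ["micro_plan"] else [])
    ++ (if joy then ["summary"] else [])
    ++ (if sad then ["compassion"] else [])

-- ===== PRECONDITION & SPEC =====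
def Spec_allowed_modes (intent : String) (emotion : String) (out : List String) : Prop := out = allowed_modes_alt intent emotion
instance (intent : String) (emotion : String) (out : List String) : Decidable (Spec_allowed_modes intent emotion out) := by unfold Spec_allowed_modes; infer_instance

-- ===== CLAIM (what is proved, stated in full; the proofs are below) =====
def Claim_equal_allowed_modes : Prop := ∀ (intent : String) (emotion : String), Dom_allowed_modes intent emotion → Spec_allowed_modes intent emotion (allowed_modes intent emotion)

-- ===== LEMMAS AND PROOFS =====

-- ===== VERDICT (by name: the statement is the Claim_ definition above) =====
theorem allowed_modes_spec : Claim_equal_allowed_modes := by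
  intro intent emotion _
  unfold Spec_allowed_modes allowed_modes allowed_modes_alt
  by_cases hs : emotion = "sadness" <;>
  by_cases hf : emotion = "fear" <;>
  by_cases ha : emotion = "anger" <;>
  by_cases hj : emotion = "joy" <;>
  by_cases hg : intent = "goal_setting" <;>
    simp [hs, hf, ha, hj, hg] <;> try decide
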